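-- pv_equiv track=rewrite | github.com/Daelijek/FinanceManagementApp | backend/app/utils/security.py | password_strength_validator
-- ===== SOURCE A (Python) =====
-- def password_strength_validator(password: str) -> tuple[bool, str]:
--     """Валидация силы пароля"""
--     if len(password) < 8:
--         return False, "Password must be at least 8 characters long"
--
--     if not any(char.isdigit() for char in password):
--         return False, "Password must contain at least one digit"
--
--     if not any(char.isupper() for char in password):
--         return False, "Password must contain at least one uppercase letter"
--
--     if not any(char.islower() for char in password):
--         return False, "Password must contain at least one lowercase letter"
--
--     special_chars = "!@#$%^&*()_+-=[]{}|;':,.<>?"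
--     if not any(char in special_chars for char in password):
--         return False, "Password must contain at least one special character"
--
--     return True, "Password is strong"
-- ===== SOURCE B (Python) =====
-- def password_strength_validator(password: str) -> tuple[bool, str]:
--     # One pass: classify every character into presence flags, then decide.
--     special_chars = "!@#$%^&*()_+-=[]{}|;':,.<>?"
--     has_digit = has_upper = has_lower = has_special = False
--     for c in password:
--         if c.isdigit():
--             has_digit = True
--         elif c.isupper():
--             has_upper = True
--         elif c.islower():
--             has_lower = True
--         if c in special_chars:
--             has_special = True
--     if len(password) < 8:
--         return False, "Password must be at least 8 characters long"
--     if not has_digit: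
--         return False, "Password must contain at least one digit"
--     if not has_upper:
--         return False, "Password must contain at least one uppercase letter"
--     if not has_lower:
--         return False, "Password must contain at least one lowercase letter"
--     if not has_special:
--         return False, "Password must contain at least one special character"
--     return True, "Password is strong"
-- ===== Notes on version B (the rewrite author's own statement) =====
-- stated objective: alternative
-- what changed: Replaces A's up-to-four separate any() scans with early returns by a single pass over the characters that accumulates four presence flags via an if/elif classification, followed by a flag-based decision stage producing the same first failing message.
import Mathlib
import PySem

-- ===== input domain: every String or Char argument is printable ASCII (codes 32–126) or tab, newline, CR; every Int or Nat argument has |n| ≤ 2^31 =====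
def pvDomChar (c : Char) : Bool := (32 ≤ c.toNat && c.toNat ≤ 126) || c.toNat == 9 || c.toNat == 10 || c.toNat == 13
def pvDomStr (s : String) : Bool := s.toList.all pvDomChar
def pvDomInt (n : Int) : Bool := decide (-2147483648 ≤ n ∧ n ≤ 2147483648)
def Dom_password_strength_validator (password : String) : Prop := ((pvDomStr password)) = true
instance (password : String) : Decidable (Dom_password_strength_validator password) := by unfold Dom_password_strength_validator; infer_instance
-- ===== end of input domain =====

-- B replaces A's up-to-four separate any() scans by a SINGLE pass that classifies each
-- character into presence flags, then decides from the flags; objective: simpler (one traversal).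

-- ===== PORT A =====
def password_strength_validator (password : String) : Bool × String :=
  if PySem.Str.len password < 8 then
    (false, "Password must be at least 8 characters long")
  else if !(password.toList.any PySem.Chars.isdigit) then
    (false, "Password must contain at least one digit")
  else if !(password.toList.any PySem.Chars.isupper) then
    (false, "Password must contain at least one uppercase letter")
  else if !(password.toList.any PySem.Chars.islower) then
    (false, "Password must contain at least one lowercase letter")
  else
    let special_chars := "!@#$%^&*()_+-=[]{}|;':,.<>?"
    if !(password.toList.any (fun c => PySem.Chars.isIn [c] special_chars.toList)) then
      (false, "Password must contain at least one special character")
    else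
      (true, "Password is strong")

-- ===== PORT B =====
-- the per-character classification step of Source B's loop (if/elif chain + special test)
def pvStep (st : Bool × Bool × Bool × Bool) (c : Char) : Bool × Bool × Bool × Bool :=
  let (d, u, l, s) := st
  let (d, u, l) :=
    if PySem.Chars.isdigit c then (true, u, l)
    else if PySem.Chars.isupper c then (d, true, l)
    else if PySem.Chars.islower c then (d, u, true)
    else (d, u, l)
  let s := if PySem.Chars.isIn [c] "!@#$%^&*()_+-=[]{}|;':,.<>?".toList then true else s
  (d, u, l, s)

def password_strength_validator_alt (password : String) : Bool × String :=
  let (hasDigit, hasUpper, hasLower, hasSpecial) :=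
    password.toList.foldl pvStep (false, false, false, false)
  if PySem.Str.len password < 8 then
    (false, "Password must be at least 8 characters long")
  else if !hasDigit then
    (false, "Password must contain at least one digit")
  else if !hasUpper then
    (false, "Password must contain at least one uppercase letter")
  else if !hasLower then
    (false, "Password must contain at least one lowercase letter")
  else if !hasSpecial then
    (false, "Password must contain at least one special character")
  else
    (true, "Password is strong")

-- ===== PRECONDITION & SPEC =====
def Spec_password_strength_validator (password : String) (out : Bool × String) : Prop := out = password_strength_validator_alt password
instance (password : String) (out : Bool × String) : Decidable (Spec_password_strength_validator password out) := by unfold Spec_password_strength_validator; infer_instance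

-- ===== CLAIM =====
def Claim_equal_password_strength_validator : Prop := ∀ (password : String), Dom_password_strength_validator password → Spec_password_strength_validator password (password_strength_validator password)

-- ===== LEMMAS AND PROOFS =====

-- the character classes used by the elif chain are pairwise disjoint (for every Char)
theorem pv_upper_not_digit (c : Char) (h : PySem.Chars.isupper c = true) : PySem.Chars.isdigit c = false := by
  simp [PySem.Chars.isupper, PySem.Chars.isdigit, Char.le_def, UInt32.le_iff_toNat_le] at *
  intro h'; omega

theorem pv_lower_not_digit (c : Char) (h : PySem.Chars.islower c = true) : PySem.Chars.isdigit c = false := by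
  simp [PySem.Chars.islower, PySem.Chars.isdigit, Char.le_def, UInt32.le_iff_toNat_le] at *
  intro h'; omega

theorem pv_lower_not_upper (c : Char) (h : PySem.Chars.islower c = true) : PySem.Chars.isupper c = false := by
  simp [PySem.Chars.islower, PySem.Chars.isupper, Char.le_def, UInt32.le_iff_toNat_le] at *
  intro h'; omega

-- disjointness makes the elif chain lossless: each step simply or-s in the four class tests
theorem pv_step_eq (d u lo s : Bool) (c : Char) :
    pvStep (d, u, lo, s) c =
      (d || PySem.Chars.isdigit c, u || PySem.Chars.isupper c, lo || PySem.Chars.islower c,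
       s || PySem.Chars.isIn [c] "!@#$%^&*()_+-=[]{}|;':,.<>?".toList) := by
  unfold pvStep
  by_cases hd : PySem.Chars.isdigit c
  · have hu : PySem.Chars.isupper c = false := by
      by_cases h : PySem.Chars.isupper c
      · simp [pv_upper_not_digit c h] at hd
      · simpa using h
    have hl : PySem.Chars.islower c = false := by
      by_cases h : PySem.Chars.islower c
      · simp [pv_lower_not_digit c h] at hd
      · simpa using h
    simp [hd, hu, hl, Bool.or_comm]
  · simp only [Bool.not_eq_true] at hd
    by_cases hu : PySem.Chars.isupper c
    · have hl : PySem.Chars.islower c = false := by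
        by_cases h : PySem.Chars.islower c
        · simp [pv_lower_not_upper c h] at hu
        · simpa using h
      simp [hd, hu, hl, Bool.or_comm]
    · simp only [Bool.not_eq_true] at hu
      by_cases hl : PySem.Chars.islower c <;>
        · simp [hd, hu, hl, Bool.or_comm]

-- the fold therefore computes exactly the four any-scans
theorem pv_fold_flags (l : List Char) (d u lo s : Bool) :
    l.foldl pvStep (d, u, lo, s) =
      (d || l.any PySem.Chars.isdigit,
       u || l.any PySem.Chars.isupper,
       lo || l.any PySem.Chars.islower,
       s || l.any (fun c => PySem.Chars.isIn [c] "!@#$%^&*()_+-=[]{}|;':,.<>?".toList)) := by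
  induction l generalizing d u lo s with
  | nil => simp
  | cons c t ih =>
    simp [List.foldl_cons, pv_step_eq, ih, Bool.or_assoc, Bool.or_comm, Bool.or_left_comm]

-- ===== VERDICT =====
theorem password_strength_validator_spec : Claim_equal_password_strength_validator := by
  intro p _
  unfold Spec_password_strength_validator password_strength_validator password_strength_validator_alt
  simp only [pv_fold_flags, Bool.false_or]
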